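-- pv_equiv track=rewrite | github.com/magenta1223/boj-archive | problems/1208번： 부분수열의 합 2/1208번： 부분수열의 합 2.py | solve
-- ===== SOURCE A (Python) =====
-- from collections import Counter
--
-- def solve(array):
--     n = len(array)
--     dp = [0] * (1<<n)
--     # 모든 조합의 합, 그 개수를 구하면 됨
--     for i in range(1<<n):
--         for j in range(n):
--             if i & (1<<j):
--                 continue
--             # 새 조합 구하기
--             dp[i|(1<<j)] = dp[i] + array[j]
--     return Counter(dp)
-- ===== SOURCE B (Python) =====
-- from collections import Counter
--
-- def solve(array):
--     # Doubling: subset sums in mask order, one pass per element (O(2^n) adds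
--     # instead of A's O(n*2^n) dp over all masks).
--     sums = [0]
--     for x in array:
--         sums += [s + x for s in sums]
--     return Counter(sums)
-- ===== Notes on version B (the rewrite author's own statement) =====
-- stated objective: faster
-- what changed: Replaces A's dp over all 2^n bitmasks (an inner scan over all n bits per mask) by the doubling construction that builds the subset-sum list in mask order with one pass per element, then counts it the same way.
import Mathlib
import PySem

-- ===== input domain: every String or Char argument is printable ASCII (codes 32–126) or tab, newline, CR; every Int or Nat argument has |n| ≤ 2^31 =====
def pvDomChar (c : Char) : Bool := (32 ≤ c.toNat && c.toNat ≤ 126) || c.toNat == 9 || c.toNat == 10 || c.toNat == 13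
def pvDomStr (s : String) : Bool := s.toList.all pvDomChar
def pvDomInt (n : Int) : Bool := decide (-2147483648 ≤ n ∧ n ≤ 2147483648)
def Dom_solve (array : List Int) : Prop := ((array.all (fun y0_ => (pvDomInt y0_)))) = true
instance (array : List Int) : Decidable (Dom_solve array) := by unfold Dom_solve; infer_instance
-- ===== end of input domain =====

-- B replaces A's O(n·2^n) dp over all bitmasks by the O(2^n) doubling construction of the
-- subset-sum list (one pass appending x to every previous sum); same Counter, same order.

-- ===== PORT A =====
-- inner loop 'for j in range(n): if i & (1<<j): continue; dp[i|(1<<j)] = dp[i] + array[j]'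
-- (all list indices are provably in range, so dp[i] is dp.getD i 0 and the store is List.set;
--  Python's ranges here run over nonnegative ints, so Nat ranges are exact)
def solveInner (array : List Int) (dp : List Int) (i : Nat) : List Int :=
  (List.range array.length).foldl (fun dp j =>
    if i &&& (1 <<< j) ≠ 0 then dp
    else dp.set (i ||| (1 <<< j)) (dp.getD i 0 + array.getD j 0)) dp

def solve (array : List Int) : List (Int × Int) :=
  let n := array.length
  let dp0 : List Int := List.replicate (1 <<< n) 0        -- dp = [0] * (1<<n)
  let dp := (List.range (1 <<< n)).foldl (solveInner array) dp0   -- for i in range(1<<n): …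
  (PySem.Dict.counter dp).items                            -- return Counter(dp)

-- ===== PORT B =====
def solve_alt (array : List Int) : List (Int × Int) :=
  -- sums = [0]; for x in array: sums += [s + x for s in sums]
  let sums := array.foldl (fun sums x => sums ++ sums.map (fun s => s + x)) ([0] : List Int)
  (PySem.Dict.counter sums).items                          -- return Counter(sums)

-- ===== PRECONDITION & SPEC =====
def Spec_solve (array : List Int) (out : List (Int × Int)) : Prop := out = solve_alt array
instance (array : List Int) (out : List (Int × Int)) : Decidable (Spec_solve array out) := by unfold Spec_solve; infer_instance

-- ===== CLAIM (what is proved, stated in full; the proofs are below) =====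
def Claim_equal_solve : Prop := ∀ (array : List Int), Dom_solve array → Spec_solve array (solve array)

-- ===== LEMMAS AND PROOFS =====

-- sum of array over the set bits of mask m (the value dp[m] holds at the end of A's loop,
-- and the m-th entry of B's doubling list)
def pvMaskSum (arr : List Int) (m : Nat) : Int :=
  ∑ j ∈ Finset.range arr.length, if m.testBit j then arr.getD j 0 else 0

lemma pv_guard (i j : Nat) : (i &&& (1 <<< j) ≠ 0) ↔ i.testBit j = true := by
  rw [Nat.shiftLeft_eq, one_mul, Nat.and_two_pow]
  cases h : i.testBit j <;> simp

lemma pv_or_ne (i j : Nat) (h : i.testBit j = false) : i ||| (1 <<< j) ≠ i := by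
  intro he
  have : (i ||| (1 <<< j)).testBit j = i.testBit j := by rw [he]
  rw [Nat.shiftLeft_eq, one_mul] at this
  simp [Nat.testBit_or, h] at this

lemma pv_or_inj (i j j' : Nat) (hj : i.testBit j = false) (_hj' : i.testBit j' = false)
    (he : i ||| (1 <<< j) = i ||| (1 <<< j')) : j = j' := by
  have h1 : (i ||| (1 <<< j')).testBit j = true := by
    rw [← he, Nat.shiftLeft_eq, one_mul]
    simp [Nat.testBit_or]
  rw [Nat.shiftLeft_eq, one_mul] at h1
  simp only [Nat.testBit_or, Nat.testBit_two_pow, hj, Bool.false_or,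
    decide_eq_true_eq] at h1
  exact h1.symm

lemma pv_clear_lt (k j : Nat) (h : k.testBit j = true) : k ^^^ (1 <<< j) < k := by
  rw [Nat.shiftLeft_eq, one_mul]
  refine Nat.lt_of_testBit j (by simp [Nat.testBit_xor, h]) h
    (fun t ht => ?_)
  have hne : ¬ j = t := by omega
  simp [Nat.testBit_xor, hne]

lemma pvMaskSum_zero (arr : List Int) : pvMaskSum arr 0 = 0 := by simp [pvMaskSum]

lemma pvMaskSum_or (arr : List Int) (i j : Nat) (hj : j < arr.length)
    (hb : i.testBit j = false) :
    pvMaskSum arr (i ||| (1 <<< j)) = pvMaskSum arr i + arr.getD j 0 := by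
  unfold pvMaskSum
  rw [Nat.shiftLeft_eq, one_mul]
  have hmem : j ∈ Finset.range arr.length := Finset.mem_range.2 hj
  rw [← Finset.sum_erase_add _ _ hmem, ← Finset.sum_erase_add _ _ hmem]
  have hcong : ∀ t ∈ (Finset.range arr.length).erase j,
      (if (i ||| 2 ^ j).testBit t then arr.getD t 0 else 0)
        = (if i.testBit t then arr.getD t 0 else 0) := by
    intro t htm
    have htj : ¬ j = t := fun hh => (Finset.mem_erase.1 htm).1 hh.symm
    simp [Nat.testBit_or, htj]
  rw [Finset.sum_congr rfl hcong]
  simp [Nat.testBit_or, hb]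

lemma pvMaskSum_cons_even (x : Int) (l : List Int) (q : Nat) :
    pvMaskSum (x :: l) (2 * q) = pvMaskSum l q := by
  unfold pvMaskSum
  rw [List.length_cons, Finset.sum_range_succ']
  have hs : ∀ t ∈ Finset.range l.length,
      (if (2 * q).testBit (t + 1) then (x :: l).getD (t + 1) 0 else 0)
        = (if q.testBit t then l.getD t 0 else 0) := by
    intro t _
    rw [Nat.testBit_add_one, show 2 * q / 2 = q by omega]
    rfl
  rw [Finset.sum_congr rfl hs]
  simp

lemma pvMaskSum_cons_odd (x : Int) (l : List Int) (q : Nat) :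
    pvMaskSum (x :: l) (2 * q + 1) = x + pvMaskSum l q := by
  unfold pvMaskSum
  rw [List.length_cons, Finset.sum_range_succ']
  have hs : ∀ t ∈ Finset.range l.length,
      (if (2 * q + 1).testBit (t + 1) then (x :: l).getD (t + 1) 0 else 0)
        = (if q.testBit t then l.getD t 0 else 0) := by
    intro t _
    rw [Nat.testBit_add_one, show (2 * q + 1) / 2 = q by omega]
    rfl
  rw [Finset.sum_congr rfl hs]
  simp [add_comm]

lemma pv_range_two_mul (M : Nat) :
    List.range (2 * M) = (List.range M).flatMap (fun q => [2 * q, 2 * q + 1]) := by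
  induction M with
  | zero => simp
  | succ M ih =>
      rw [show 2 * (M + 1) = (2 * M + 1) + 1 by ring, List.range_succ,
        show 2 * M + 1 = (2 * M) + 1 from rfl, List.range_succ, ih, List.range_succ]
      simp

-- B side: the doubling loop produces [pvMaskSum array m for m in range(2^n)]
lemma pv_foldl_doubling (l : List Int) (acc : List Int) :
    l.foldl (fun sums x => sums ++ sums.map (fun s => s + x)) acc
      = (List.range (2 ^ l.length)).flatMap (fun q => acc.map (fun a => a + pvMaskSum l q)) := by
  induction l generalizing acc with
  | nil => simp [pvMaskSum_zero, List.range_one]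
  | cons x l ih =>
      rw [List.foldl_cons, ih, List.length_cons, pow_succ, mul_comm, pv_range_two_mul,
        List.flatMap_assoc]
      refine List.flatMap_congr (fun q hq => ?_)
      simp [pvMaskSum_cons_even, pvMaskSum_cons_odd, List.map_map]

lemma pv_sums_eq (array : List Int) :
    array.foldl (fun sums x => sums ++ sums.map (fun s => s + x)) ([0] : List Int)
      = (List.range (2 ^ array.length)).map (pvMaskSum array) := by
  rw [pv_foldl_doubling]
  simp [← List.map_eq_flatMap]

-- getD/set helpers
lemma pv_getD_set_self (l : List Int) (i : Nat) (v : Int) (h : i < l.length) :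
    (l.set i v).getD i 0 = v := by
  rw [List.getD_eq_getElem?_getD, List.getElem?_set]
  simp [h]

lemma pv_getD_set_ne (l : List Int) (i m : Nat) (v : Int) (h : i ≠ m) :
    (l.set i v).getD m 0 = l.getD m 0 := by
  rw [List.getD_eq_getElem?_getD, List.getElem?_set, List.getD_eq_getElem?_getD]
  simp [h]

-- A side, inner loop: it writes dp[i] + array[j] into slot i|(1<<j) for every j not in i,
-- and touches nothing else
lemma pv_inner_js (array : List Int) (i : Nat) (js : List Nat) (hnd : js.Nodup)
    (dp : List Int) (hin : ∀ j ∈ js, i ||| (1 <<< j) < dp.length) :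
    (js.foldl (fun dp j =>
        if i &&& (1 <<< j) ≠ 0 then dp
        else dp.set (i ||| (1 <<< j)) (dp.getD i 0 + array.getD j 0)) dp).length = dp.length
    ∧ (∀ m : Nat, (∀ j ∈ js, i.testBit j = false → m ≠ i ||| (1 <<< j)) →
        (js.foldl (fun dp j =>
          if i &&& (1 <<< j) ≠ 0 then dp
          else dp.set (i ||| (1 <<< j)) (dp.getD i 0 + array.getD j 0)) dp).getD m 0
          = dp.getD m 0)
    ∧ (∀ j ∈ js, i.testBit j = false →
        (js.foldl (fun dp j =>
          if i &&& (1 <<< j) ≠ 0 then dp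
          else dp.set (i ||| (1 <<< j)) (dp.getD i 0 + array.getD j 0)) dp).getD
            (i ||| (1 <<< j)) 0 = dp.getD i 0 + array.getD j 0) := by
  induction js generalizing dp with
  | nil => exact ⟨rfl, fun m _ => rfl, fun j hj => absurd hj (List.not_mem_nil)⟩
  | cons j js ih =>
      rw [List.nodup_cons] at hnd
      rw [List.foldl_cons]
      by_cases hb : i.testBit j = true
      · have hg : (i &&& (1 <<< j) ≠ 0) := (pv_guard i j).2 hb
        rw [if_pos hg]
        obtain ⟨h1, h2, h3⟩ := ih hnd.2 dp (fun j' hj' => hin j' (List.mem_cons_of_mem _ hj'))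
        refine ⟨h1, fun m hm => h2 m (fun j' hj' => hm j' (List.mem_cons_of_mem _ hj')),
          fun j' hj' hbj' => ?_⟩
        rcases List.mem_cons.1 hj' with rfl | hj'
        · simp [hb] at hbj'
        · exact h3 j' hj' hbj'
      · have hb' : i.testBit j = false := by simpa using hb
        have hg : ¬ (i &&& (1 <<< j) ≠ 0) := fun hc => by simp [(pv_guard i j).1 hc] at hb'
        rw [if_neg hg]
        have hlen : (dp.set (i ||| (1 <<< j)) (dp.getD i 0 + array.getD j 0)).length
            = dp.length := List.length_set
        obtain ⟨h1, h2, h3⟩ := ih hnd.2 (dp.set (i ||| (1 <<< j)) (dp.getD i 0 + array.getD j 0))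
          (fun j' hj' => by rw [hlen]; exact hin j' (List.mem_cons_of_mem _ hj'))
        refine ⟨h1.trans hlen, ?_, ?_⟩
        · intro m hm
          rw [h2 m (fun j' hj' => hm j' (List.mem_cons_of_mem _ hj')),
            pv_getD_set_ne _ _ _ _ (fun hc => hm j (List.mem_cons_self) hb' hc.symm)]
        · intro j' hj' hbj'
          rcases List.mem_cons.1 hj' with rfl | hj'
          · rw [h2 (i ||| (1 <<< j')) (fun j'' hj'' hbj'' hc =>
                hnd.1 (by rw [pv_or_inj i j' j'' hbj' hbj'' hc]; exact hj'')),
              pv_getD_set_self _ _ _ (hin j' (List.mem_cons_self))]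
          · rw [h3 j' hj' hbj', pv_getD_set_ne _ _ _ _ (pv_or_ne i j hb')]

def pvWr (n k m : Nat) : Prop :=
  m = 0 ∨ ∃ j, j < n ∧ m.testBit j = true ∧ m ^^^ (1 <<< j) < k

lemma pv_wr_self (n k : Nat) (hk : k < 2 ^ n) : pvWr n k k := by
  by_cases h0 : k = 0
  · exact Or.inl h0
  · obtain ⟨j, hj⟩ := Nat.exists_testBit_of_ne_zero h0
    refine Or.inr ⟨j, ?_, hj, pv_clear_lt k j hj⟩
    by_contra hge
    have : k < 2 ^ j := lt_of_lt_of_le hk (Nat.pow_le_pow_right (by omega) (by omega))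
    simp [Nat.testBit_lt_two_pow this] at hj

-- A side, outer loop invariant
lemma pv_outer_inv (array : List Int) (k : Nat) (hk : k ≤ 2 ^ array.length) :
    ((List.range k).foldl (solveInner array)
        (List.replicate (1 <<< array.length) 0)).length = 2 ^ array.length
    ∧ ∀ m, m < 2 ^ array.length → pvWr array.length k m →
        ((List.range k).foldl (solveInner array)
          (List.replicate (1 <<< array.length) 0)).getD m 0 = pvMaskSum array m := by
  induction k with
  | zero =>
      refine ⟨by simp [Nat.shiftLeft_eq], ?_⟩
      intro m hm hw
      rcases hw with rfl | ⟨j, hj, hbm, hlt⟩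
      · simp [pvMaskSum_zero]
      · omega
  | succ k ih =>
      have hk' : k < 2 ^ array.length := by omega
      obtain ⟨ihlen, ihv⟩ := ih (le_of_lt hk')
      rw [List.range_succ, List.foldl_append, List.foldl_cons, List.foldl_nil]
      set F := (List.range k).foldl (solveInner array)
        (List.replicate (1 <<< array.length) 0) with hF
      have hin : ∀ j ∈ List.range array.length, k ||| (1 <<< j) < F.length := by
        intro j hj
        rw [ihlen, Nat.shiftLeft_eq, one_mul]
        exact Nat.or_lt_two_pow hk'
          (Nat.pow_lt_pow_right (by omega) (List.mem_range.1 hj))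
      obtain ⟨h1, h2, h3⟩ := pv_inner_js array k (List.range array.length)
        (List.nodup_range) F hin
      have hread : F.getD k 0 = pvMaskSum array k := ihv k hk' (pv_wr_self _ _ hk')
      constructor
      · show (solveInner array F k).length = _
        rw [solveInner, h1, ihlen]
      · intro m hm hw
        show (solveInner array F k).getD m 0 = _
        rw [solveInner]
        by_cases hex : ∃ j, j < array.length ∧ k.testBit j = false ∧ m = k ||| (1 <<< j)
        · obtain ⟨j, hj, hbj, rfl⟩ := hex
          rw [h3 j (List.mem_range.2 hj) hbj, hread, ← pvMaskSum_or array k j hj hbj]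
        · push Not at hex
          rw [h2 m (fun j hj hbj => hex j (List.mem_range.1 hj) hbj)]
          apply ihv m hm
          rcases hw with rfl | ⟨j, hj, hbm, hlt⟩
          · exact Or.inl rfl
          · rcases Nat.lt_succ_iff_lt_or_eq.1 hlt with hlt' | heq
            · exact Or.inr ⟨j, hj, hbm, hlt'⟩
            · exfalso
              have hkb : k.testBit j = false := by
                rw [← heq, Nat.shiftLeft_eq, one_mul]
                simp [Nat.testBit_xor, hbm]
              have hme : m = k ||| (1 <<< j) := by
                rw [← heq, Nat.shiftLeft_eq, one_mul]
                apply Nat.eq_of_testBit_eq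
                intro t
                by_cases htj : t = j
                · subst htj
                  simp [Nat.testBit_or, Nat.testBit_xor, hbm]
                · have : ¬ j = t := fun hh => htj hh.symm
                  simp [Nat.testBit_or, Nat.testBit_xor, this]
              exact hex j hj hkb hme

lemma pv_dp_eq (array : List Int) :
    (List.range (1 <<< array.length)).foldl (solveInner array)
        (List.replicate (1 <<< array.length) 0)
      = (List.range (2 ^ array.length)).map (pvMaskSum array) := by
  have hpow : (1 : Nat) <<< array.length = 2 ^ array.length := by
    rw [Nat.shiftLeft_eq, one_mul]
  obtain ⟨hlen, hv⟩ := pv_outer_inv array (1 <<< array.length) (le_of_eq hpow)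
  apply List.ext_getElem
  · simp [hlen]
  · intro i h1 h2
    have him : i < 2 ^ array.length := by
      rw [← hlen]; exact h1
    have hwr : pvWr array.length (1 <<< array.length) i := by
      rw [hpow]
      by_cases h0 : i = 0
      · exact Or.inl h0
      · obtain ⟨j, hj⟩ := Nat.exists_testBit_of_ne_zero h0
        refine Or.inr ⟨j, ?_, hj, lt_trans (pv_clear_lt i j hj) him⟩
        by_contra hge
        have : i < 2 ^ j := lt_of_lt_of_le him (Nat.pow_le_pow_right (by omega) (by omega))
        simp [Nat.testBit_lt_two_pow this] at hj
    have := hv i him hwr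
    rw [List.getD_eq_getElem?_getD, List.getElem?_eq_getElem h1] at this
    simp only [Option.getD_some] at this
    rw [this]
    simp

-- ===== VERDICT (by name: the statement is the Claim_ definition above) =====
theorem solve_spec : Claim_equal_solve := by
  intro array _
  unfold Spec_solve
  simp only [solve, solve_alt]
  rw [pv_dp_eq, pv_sums_eq]
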